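-- pv_equiv track=rewrite | github.com/le1ezeraXD/LeetCodes | 每日一题/June/0625找到矩阵中的好子集.py | goodSubsetofBinaryMatrix
-- ===== SOURCE A (Python) =====
-- from typing import List
--
-- def goodSubsetofBinaryMatrix(grid: List[List[int]]) -> List[int]:
--     n = len(grid[0])
--     mask_to_idx = [-1] * (1 << n)
--     for i, row in enumerate(grid):
--         mask = 0
--         for j, x in enumerate(row):
--             mask |= x << j
--         if mask == 0:
--             return [i]
--         mask_to_idx[mask] = i
--
--     u = (1 << n) - 1
--     for x, i in enumerate(mask_to_idx):
--         if i < 0: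
--             continue
--         y = c = u ^ x
--         while y:
--             j = mask_to_idx[y]
--             if j >= 0:
--                 return sorted((i, j))
--             y = (y - 1) & c
--     return []
-- ===== SOURCE B (Python) =====
-- def goodSubsetofBinaryMatrix(grid):
--     n = len(grid[0])
--     size = 1 << n
--     mask_to_idx = [-1] * size
--     for i, row in enumerate(grid):
--         mask = 0
--         for j, x in enumerate(row):
--             mask |= x << j
--         if mask == 0:
--             return [i]
--         mask_to_idx[mask] = i
--
--     for x in range(size):
--         if mask_to_idx[x] >= 0:
--             for y in range(size - 1, 0, -1):
--                 if x & y == 0 and mask_to_idx[y] >= 0: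
--                     return sorted((mask_to_idx[x], mask_to_idx[y]))
--     return []
-- ===== Notes on version B (the rewrite author's own statement) =====
-- stated objective: simpler
-- what changed: B keeps A's mask table but replaces the submask-enumeration trick (y = (y-1) & c walking the submasks of the complement) with a plain descending for-loop over all mask values filtered by x & y == 0, which hits the same largest compatible mask first.
import Mathlib
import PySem

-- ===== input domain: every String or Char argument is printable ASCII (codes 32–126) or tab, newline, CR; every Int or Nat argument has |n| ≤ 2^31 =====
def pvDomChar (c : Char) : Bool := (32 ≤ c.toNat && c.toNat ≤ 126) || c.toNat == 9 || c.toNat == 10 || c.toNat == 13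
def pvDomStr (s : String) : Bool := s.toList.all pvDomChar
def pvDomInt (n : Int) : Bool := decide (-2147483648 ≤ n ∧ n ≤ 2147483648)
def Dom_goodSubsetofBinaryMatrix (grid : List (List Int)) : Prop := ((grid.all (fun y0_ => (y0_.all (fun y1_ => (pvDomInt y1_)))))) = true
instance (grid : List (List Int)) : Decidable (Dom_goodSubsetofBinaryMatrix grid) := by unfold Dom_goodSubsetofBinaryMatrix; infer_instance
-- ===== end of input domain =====

-- B keeps A's mask table but replaces the submask-enumeration trick (y = (y-1) & c over
-- the complement) by a plain descending scan over all mask values filtered by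
-- x & y == 0; objective: simpler (no speed claim).

-- ===== PORT A =====

-- shared inner loop of both Pythons: `mask = 0; for j, x in enumerate(row): mask |= x << j`
-- (x << j is ported as the core Int shift x <<< j, exact for the Nat index j)
def rowMask : List Int → Nat → Int → Int
  | [], _, m => m
  | x :: rest, j, m => rowMask rest (j + 1) (PySem.Int.bor m (x <<< j))

-- shared first for-loop of both Pythons: fills mask_to_idx (a dense list) or returns
-- early on a zero row; mask_to_idx[mask] = i is PySem.List.pySetD (Python raises
-- IndexError for masks out of range after negative wraparound — excluded by Pre_)
def buildTable : List (List Int) → Int → List Int → (List Int) ⊕ (List Int)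
  | [], _, tbl => Sum.inr tbl
  | row :: rest, i, tbl =>
    let mask := rowMask row 0 0
    if mask = 0 then Sum.inl [i]
    else buildTable rest (i + 1) (PySem.List.pySetD tbl mask i)

-- A's `while y:` loop; (y - 1) &&& c strictly decreases, mask_to_idx[y] is in range for
-- 1 ≤ y ≤ u < len (pyGetD with default -1, exact there)
def innerA (tbl : List Int) (c : Nat) (i : Int) (y : Nat) : Option (List Int) :=
  if y = 0 then none
  else
    let j := PySem.List.pyGetD tbl (y : Int) (-1)
    if 0 ≤ j then some (PySem.List.sorted [i, j] (fun v => v) false)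
    else innerA tbl c i ((y - 1) &&& c)
termination_by y
decreasing_by
  have h1 : (y - 1) &&& c ≤ y - 1 := Nat.and_le_left
  omega

-- A's `for x, i in enumerate(mask_to_idx):` as structural recursion with the index counter x
def outerA (tbl : List Int) (u : Nat) : Nat → List Int → List Int
  | _, [] => []
  | x, i :: rest =>
    if i < 0 then outerA tbl u (x + 1) rest
    else
      match innerA tbl (u ^^^ x) i (u ^^^ x) with
      | some r => r
      | none => outerA tbl u (x + 1) rest

def goodSubsetofBinaryMatrix (grid : List (List Int)) : List Int :=
  let n := grid.headI.length   -- len(grid[0]); Python raises IndexError on [] (excluded by Pre_)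
  match buildTable grid 0 (List.replicate (1 <<< n) (-1)) with
  | Sum.inl r => r
  | Sum.inr tbl => outerA tbl ((1 <<< n) - 1) 0 tbl

-- ===== PORT B =====

-- `range(size - 1, 0, -1)` = [size-1, ..., 1]
def descRange (full : Nat) : List Nat := (List.range full).map (fun k => full - k)

-- B's inner for-loop: `if x & y == 0 and mask_to_idx[y] >= 0: return sorted(...)`
def innerB (tbl : List Int) (x : Nat) (i : Int) : List Nat → Option (List Int)
  | [] => none
  | y :: ys =>
    if x &&& y = 0 then
      let j := PySem.List.pyGetD tbl (y : Int) (-1)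
      if 0 ≤ j then some (PySem.List.sorted [i, j] (fun v => v) false)
      else innerB tbl x i ys
    else innerB tbl x i ys

-- B's outer for-loop: `for x in range(size): if mask_to_idx[x] >= 0: …`
def outerB (tbl : List Int) (full : Nat) : List Nat → List Int
  | [] => []
  | x :: xs =>
    let i := PySem.List.pyGetD tbl (x : Int) (-1)
    if 0 ≤ i then
      match innerB tbl x i (descRange full) with
      | some r => r
      | none => outerB tbl full xs
    else outerB tbl full xs

def goodSubsetofBinaryMatrix_alt (grid : List (List Int)) : List Int :=
  let n := grid.headI.length
  match buildTable grid 0 (List.replicate (1 <<< n) (-1)) with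
  | Sum.inl r => r
  | Sum.inr tbl => outerB tbl ((1 <<< n) - 1) (List.range (1 <<< n))

-- ===== PRECONDITION & SPEC =====
-- Pre_ excludes exactly the inputs on which A raises IndexError: the empty grid, and
-- grids in which some row's bit-mask falls outside the index range [-2^n, 2^n) of the
-- 2^n-entry table before any all-zero row (rows from the first all-zero row on are never
-- reached, since A returns there).
def Pre_goodSubsetofBinaryMatrix (grid : List (List Int)) : Prop :=
  grid ≠ [] ∧ ∀ row ∈ grid.takeWhile (fun r => rowMask r 0 0 != 0),
    -((2^grid.headI.length : Nat) : Int) ≤ rowMask row 0 0 ∧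
    rowMask row 0 0 < ((2^grid.headI.length : Nat) : Int)
instance (grid : List (List Int)) : Decidable (Pre_goodSubsetofBinaryMatrix grid) := by
  unfold Pre_goodSubsetofBinaryMatrix; infer_instance

def pvWitness_goodSubsetofBinaryMatrix : List (List Int) := [[1, 0], [0, 1], [1, 1]]

def Spec_goodSubsetofBinaryMatrix (grid : List (List Int)) (out : List Int) : Prop := out = goodSubsetofBinaryMatrix_alt grid
instance (grid : List (List Int)) (out : List Int) : Decidable (Spec_goodSubsetofBinaryMatrix grid out) := by unfold Spec_goodSubsetofBinaryMatrix; infer_instance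

-- ===== CLAIM (what is proved, stated in full; the proofs are below) =====
def Claim_equal_goodSubsetofBinaryMatrix : Prop := ∀ (grid : List (List Int)), Dom_goodSubsetofBinaryMatrix grid → Pre_goodSubsetofBinaryMatrix grid → Spec_goodSubsetofBinaryMatrix grid (goodSubsetofBinaryMatrix grid)

-- ===== LEMMAS AND PROOFS =====

theorem pv_and_mod_two (a b : Nat) : (a &&& b) % 2 = (a % 2) * (b % 2) := by
  have h := Nat.and_mod_two_eq_one (a := a) (b := b)
  have ha := Nat.mod_two_eq_zero_or_one a
  have hb := Nat.mod_two_eq_zero_or_one b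
  rcases ha with h1|h1 <;> rcases hb with h2|h2 <;> rw [h1, h2] <;> omega

theorem pv_and_decomp (a b : Nat) : a &&& b = 2 * (a/2 &&& b/2) + (a % 2) * (b % 2) := by
  conv_lhs => rw [← Nat.div_add_mod (a &&& b) 2]
  rw [Nat.and_div_two, pv_and_mod_two]

-- the predecessor submask (y-1) &&& c skips no submask of c below y
theorem pv_key : ∀ y c z : Nat, y &&& c = y → z &&& c = z → z < y → z ≤ (y - 1) &&& c := by
  intro y
  induction y using Nat.strong_induction_on with
  | _ y IH =>
    intro c z hy hz hlt
    have hdy := pv_and_decomp y c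
    have hdz := pv_and_decomp z c
    have hd1 := pv_and_decomp (y - 1) c
    have hcm := Nat.mod_two_eq_zero_or_one c
    rcases Nat.mod_two_eq_zero_or_one y with hyE | hyO
    · rw [hyE, Nat.zero_mul] at hdy
      have h1 : (y - 1) / 2 = y / 2 - 1 := by omega
      have h2 : (y - 1) % 2 = 1 := by omega
      rw [h1, h2] at hd1
      have hysub : y / 2 &&& c / 2 = y / 2 := by omega
      rcases hcm with hc | hc <;> rcases Nat.mod_two_eq_zero_or_one z with hz2 | hz2 <;>
          rw [hc, hz2] at hdz <;> rw [hc] at hd1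
      · have hzsub : z / 2 &&& c / 2 = z / 2 := by omega
        have := IH (y / 2) (by omega) (c / 2) (z / 2) hysub hzsub (by omega)
        omega
      · omega
      · have hzsub : z / 2 &&& c / 2 = z / 2 := by omega
        have := IH (y / 2) (by omega) (c / 2) (z / 2) hysub hzsub (by omega)
        omega
      · have hzsub : z / 2 &&& c / 2 = z / 2 := by omega
        have := IH (y / 2) (by omega) (c / 2) (z / 2) hysub hzsub (by omega)
        omega
    · have h1 : (y - 1) / 2 = y / 2 := by omega
      have h2 : (y - 1) % 2 = 0 := by omega
      rw [h1, h2] at hd1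
      rcases hcm with hc | hc <;> rw [hc] at hdy hd1 <;> omega

-- being a submask of the complement of x (inside n bits) is disjointness from x
theorem pv_submask_compl_iff (n x y : Nat) (_hx : x < 2^n) (hy : y < 2^n) :
    (y &&& ((2^n - 1) ^^^ x) = y) ↔ (x &&& y = 0) := by
  constructor
  · intro h
    apply Nat.eq_of_testBit_eq
    intro i
    have hb := congrArg (fun t => t.testBit i) h
    simp only [Nat.testBit_and, Nat.testBit_xor, Nat.testBit_two_pow_sub_one] at hb ⊢
    by_cases hi : i < n
    · simp [hi] at hb
      cases hx' : x.testBit i <;> cases hy' : y.testBit i <;> simp_all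
    · have hyb : y.testBit i = false :=
        Nat.testBit_eq_false_of_lt (lt_of_lt_of_le hy (Nat.pow_le_pow_right (by omega) (by omega)))
      simp [hyb]
  · intro h
    apply Nat.eq_of_testBit_eq
    intro i
    have hb := congrArg (fun t => t.testBit i) h
    simp only [Nat.testBit_and, Nat.testBit_xor, Nat.testBit_two_pow_sub_one, Nat.zero_testBit] at hb ⊢
    by_cases hi : i < n
    · simp [hi]
      cases hx' : x.testBit i <;> cases hy' : y.testBit i <;> simp_all
    · have hyb : y.testBit i = false :=
        Nat.testBit_eq_false_of_lt (lt_of_lt_of_le hy (Nat.pow_le_pow_right (by omega) (by omega)))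
      simp [hyb]

-- descending list [s, s-1, ..., 1]
def descList : Nat → List Nat
  | 0 => []
  | s + 1 => (s + 1) :: descList s

theorem descRange_eq_descList (full : Nat) : descRange full = descList full := by
  induction full with
  | zero => rfl
  | succ f ih =>
    rw [descRange, List.range_succ_eq_map, List.map_cons, List.map_map, descList, ← ih, descRange]
    congr 1
    apply List.map_congr_left
    intro k _
    simp [Function.comp]

theorem mem_descList {a y : Nat} (h : y ∈ descList a) : 1 ≤ y ∧ y ≤ a := by
  induction a with
  | zero => simp [descList] at h
  | succ a ih =>
    rw [descList, List.mem_cons] at h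
    rcases h with h | h
    · omega
    · have := ih h; omega

-- the submask chain y, (y-1)&c, ... visits exactly the submasks of c in descending order
def chainList (c : Nat) (y : Nat) : List Nat :=
  if y = 0 then [] else y :: chainList c ((y - 1) &&& c)
termination_by y
decreasing_by
  have h1 : (y - 1) &&& c ≤ y - 1 := Nat.and_le_left
  omega

theorem pv_filter_descList_eq (p : Nat → Bool) :
    ∀ a b : Nat, b ≤ a → (∀ z, b < z → z ≤ a → p z = false) →
      (descList a).filter p = (descList b).filter p := by
  intro a
  induction a with
  | zero => intro b hb _; interval_cases b; rfl
  | succ a ih =>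
    intro b hb hgap
    by_cases hba : b = a + 1
    · rw [hba]
    · have hb' : b ≤ a := by omega
      rw [descList, List.filter_cons, hgap (a+1) (by omega) (by omega)]
      exact ih b hb' (fun z h1 h2 => hgap z h1 (by omega))

theorem pv_chain_eq_filter (c : Nat) :
    ∀ s : Nat, s &&& c = s →
      chainList c s = (descList s).filter (fun z => z &&& c == z) := by
  intro s
  induction s using Nat.strong_induction_on with
  | _ s IH =>
    intro hs
    match s with
    | 0 => rw [chainList]; simp [descList]
    | s + 1 =>
      rw [chainList, if_neg (by omega : ¬ (s + 1 = 0))]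
      rw [descList, List.filter_cons, if_pos (by simp [hs])]
      congr 1
      have hsub : (s &&& c) &&& c = s &&& c := by rw [Nat.and_assoc, Nat.and_self]
      have hle : s &&& c ≤ s := Nat.and_le_left
      rw [show s + 1 - 1 = s from rfl]
      rw [IH (s &&& c) (by omega) hsub]
      rw [pv_filter_descList_eq _ s (s &&& c) hle ?_]
      intro z h1 h2
      simp only [beq_eq_false_iff_ne, ne_eq]
      intro hzc
      have := pv_key (s+1) c z hs hzc (by omega)
      simp only [Nat.add_sub_cancel] at this
      omega

-- innerA as a find over the chain
def findA (tbl : List Int) (i : Int) : List Nat → Option (List Int)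
  | [] => none
  | y :: ys =>
    let j := PySem.List.pyGetD tbl (y : Int) (-1)
    if 0 ≤ j then some (PySem.List.sorted [i, j] (fun v => v) false)
    else findA tbl i ys

theorem innerA_eq_findA (tbl : List Int) (c : Nat) (i : Int) :
    ∀ y : Nat, innerA tbl c i y = findA tbl i (chainList c y) := by
  intro y
  induction y using Nat.strong_induction_on with
  | _ y IH =>
    by_cases hy : y = 0
    · rw [hy, innerA, chainList]; rfl
    · rw [innerA, chainList, if_neg hy, if_neg hy, findA]
      have hlt : (y - 1) &&& c < y := by
        have : (y - 1) &&& c ≤ y - 1 := Nat.and_le_left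
        omega
      by_cases hj : (0 : Int) ≤ PySem.List.pyGetD tbl (y : Int) (-1)
      · simp only [hj, if_pos]
      · simp only [if_neg hj]
        exact IH _ hlt

-- bridge between findA over the filtered list and innerB over the full list
theorem find_bridge (n : Nat) (tbl : List Int) (x : Nat) (hx : x < 2^n) (i : Int) :
    ∀ l : List Nat, (∀ y ∈ l, y < 2^n) →
      findA tbl i (l.filter (fun z => z &&& ((2^n - 1) ^^^ x) == z)) = innerB tbl x i l := by
  intro l
  induction l with
  | nil => intro _; rfl
  | cons y ys ih =>
    intro hmem
    have hy : y < 2^n := hmem y (List.mem_cons_self ..)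
    have hiff := pv_submask_compl_iff n x y hx hy
    have htail := ih (fun z hz => hmem z (List.mem_cons_of_mem _ hz))
    rw [List.filter_cons, innerB]
    by_cases hxy : x &&& y = 0
    · rw [if_pos (by simpa [hiff]), if_pos hxy, findA]
      by_cases hj : (0 : Int) ≤ PySem.List.pyGetD tbl (y : Int) (-1)
      · simp only [hj, if_pos]
      · simp only [if_neg hj]
        exact htail
    · rw [if_neg (by simpa [hiff]), if_neg hxy]
      exact htail

theorem inner_equiv (n : Nat) (tbl : List Int) (x : Nat) (hx : x < 2^n) (i : Int) :
    innerA tbl ((2^n - 1) ^^^ x) i ((2^n - 1) ^^^ x) = innerB tbl x i (descRange (2^n - 1)) := by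
  have hpow : 0 < 2^n := Nat.two_pow_pos n
  have hc : (2^n - 1) ^^^ x < 2^n := Nat.xor_lt_two_pow (by omega) hx
  rw [innerA_eq_findA, pv_chain_eq_filter _ _ (Nat.and_self _)]
  have hgap : ∀ z, ((2^n - 1) ^^^ x) < z → z ≤ 2^n - 1 →
      ((fun z => z &&& ((2^n - 1) ^^^ x) == z) z) = false := by
    intro z h1 h2
    simp only [beq_eq_false_iff_ne, ne_eq]
    intro hzc
    have hle : z &&& ((2^n - 1) ^^^ x) ≤ (2^n - 1) ^^^ x := Nat.and_le_right
    omega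
  rw [← pv_filter_descList_eq _ (2^n - 1) ((2^n - 1) ^^^ x) (by omega) hgap]
  rw [descRange_eq_descList]
  apply find_bridge n tbl x hx i
  intro y hy
  have := mem_descList hy
  omega

theorem buildTable_length :
    ∀ (rows : List (List Int)) (i : Int) (tbl tbl' : List Int),
      buildTable rows i tbl = Sum.inr tbl' → tbl'.length = tbl.length := by
  intro rows
  induction rows with
  | nil => intro i tbl tbl' h; cases h; rfl
  | cons row rest ih =>
    intro i tbl tbl' h
    rw [buildTable] at h
    by_cases h0 : rowMask row 0 0 = 0
    · rw [if_pos h0] at h; cases h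
    · rw [if_neg h0] at h
      have := ih (i + 1) (PySem.List.pySetD tbl (rowMask row 0 0) i) tbl' h
      rwa [PySem.List.length_pySetD] at this

theorem outer_equiv (n : Nat) (tbl : List Int) (hlen : tbl.length = 2^n) :
    ∀ (k x : Nat), x + k = 2^n →
      outerA tbl (2^n - 1) x (tbl.drop x) = outerB tbl (2^n - 1) (List.range' x k) := by
  intro k
  induction k with
  | zero =>
    intro x hx
    rw [List.drop_eq_nil_of_le (by omega : tbl.length ≤ x)]
    rfl
  | succ k ih =>
    intro x hx
    have hxlt : x < 2^n := by omega
    have hxlen : x < tbl.length := by omega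
    rw [List.drop_eq_getElem_cons hxlen, List.range'_succ, outerA, outerB]
    have hget : PySem.List.pyGetD tbl (x : Int) (-1) = tbl[x] := by
      rw [PySem.List.pyGetD_natCast, List.getD_eq_getElem tbl (-1) hxlen]
    rw [hget]
    by_cases hneg : tbl[x] < 0
    · rw [if_pos hneg, if_neg (by omega : ¬ (0 : Int) ≤ tbl[x])]
      exact ih (x+1) (by omega)
    · rw [if_neg hneg, if_pos (by omega : (0 : Int) ≤ tbl[x])]
      rw [inner_equiv n tbl x hxlt tbl[x]]
      cases innerB tbl x tbl[x] (descRange (2^n - 1)) with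
      | none => exact ih (x+1) (by omega)
      | some r => rfl

-- ===== VERDICT (by name: the statement is the Claim_ definition above) =====
theorem goodSubsetofBinaryMatrix_spec : Claim_equal_goodSubsetofBinaryMatrix := by
  intro grid _ hPre
  unfold Spec_goodSubsetofBinaryMatrix goodSubsetofBinaryMatrix goodSubsetofBinaryMatrix_alt
  dsimp only
  set n := grid.headI.length with hn
  have hshift : (1 : Nat) <<< n = 2^n := Nat.one_shiftLeft n
  rw [hshift]
  rcases hA : buildTable grid 0 (List.replicate (2^n) (-1)) with r | tbl
  · rfl
  · have hlen : tbl.length = 2^n := by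
      have := buildTable_length grid 0 (List.replicate (2^n) (-1)) tbl hA
      simpa using this
    have hoe := outer_equiv n tbl hlen (2^n) 0 (by omega)
    rw [List.drop_zero] at hoe
    rw [List.range_eq_range']
    exact hoe
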